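-- pv_equiv track=rewrite | github.com/WeriksonAlves/Course_Electrical_Engineering | INF/101/Listas/Exercicio simulando a construção de horario escolar.py | lista_de_conflito
-- ===== SOURCE A (Python) =====
-- def lista_de_conflito(diciplinas, matriculas):
--     emptySet = set()
--     conflito = [emptySet for d in diciplinas]
--     for a in matriculas.keys():
--         for d in range(len(diciplinas)):
--             if diciplinas[d] in matriculas[a]:
--                 conflito[d] = conflito[d].union(matriculas[a])
--     return conflito, emptySet
-- ===== SOURCE B (Python) =====
-- def lista_de_conflito(diciplinas, matriculas):
--     index = {}
--     for i, d in enumerate(diciplinas):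
--         index.setdefault(d, []).append(i)
--     conflito = [set() for _ in diciplinas]
--     for turmas in matriculas.values():
--         for c in turmas:
--             for i in index.get(c, ()):
--                 conflito[i].update(turmas)
--     return conflito, set()
-- ===== Notes on version B (the rewrite author's own statement) =====
-- stated objective: faster
-- what changed: Instead of scanning all disciplines for every enrollment (with a membership test per pair), B builds a dict from discipline to its positions once and then iterates only the enrollments, updating the conflict sets in place at the looked-up positions.
import Mathlib
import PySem

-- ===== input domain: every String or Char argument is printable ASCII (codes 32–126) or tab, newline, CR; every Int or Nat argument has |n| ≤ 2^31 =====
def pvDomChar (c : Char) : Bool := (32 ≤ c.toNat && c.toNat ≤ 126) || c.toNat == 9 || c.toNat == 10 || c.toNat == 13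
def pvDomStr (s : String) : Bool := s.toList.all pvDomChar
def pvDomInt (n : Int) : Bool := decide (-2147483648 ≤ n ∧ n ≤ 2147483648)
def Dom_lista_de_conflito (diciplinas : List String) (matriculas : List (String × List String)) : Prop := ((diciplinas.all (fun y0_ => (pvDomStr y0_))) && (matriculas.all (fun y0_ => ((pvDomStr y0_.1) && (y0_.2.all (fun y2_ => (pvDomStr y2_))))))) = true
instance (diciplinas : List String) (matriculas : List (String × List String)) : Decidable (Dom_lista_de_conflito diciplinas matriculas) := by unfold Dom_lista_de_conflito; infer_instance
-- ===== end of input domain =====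

-- B replaces A's scan of ALL disciplines per enrollment by a once-built dict from discipline to its
-- positions, iterating only the enrollments' own members (asymptotically faster).

-- ===== PORT A =====
def lista_de_conflito (diciplinas : List String) (matriculas : List (String × List String)) : List (List String) × List String :=
  let emptySet : List String := PySem.Set.empty
  let md : PySem.Dict String (List String) := PySem.Dict.mk matriculas
  let conflito : List (List String) := diciplinas.map (fun _ => emptySet)
  let conflito := (PySem.Dict.keys md).foldl (fun conf a =>
    (PySem.List.pyRange 0 (diciplinas.length : Int) 1).foldl (fun conf d =>
      if PySem.List.pyGetD diciplinas d "" ∈ PySem.Dict.getD md a [] then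
        PySem.List.pySetD conf d
          (PySem.Set.union (PySem.List.pyGetD conf d []) (PySem.Dict.getD md a []))
      else conf) conf) conflito
  (conflito, emptySet)

-- ===== PORT B =====
def lista_de_conflito_alt (diciplinas : List String) (matriculas : List (String × List String)) : List (List String) × List String :=
  let index : PySem.Dict String (List Int) :=
    (PySem.List.enumerate diciplinas 0).foldl
      (fun d p => d.modify p.2 [] (· ++ [p.1])) PySem.Dict.empty
  let conflito : List (List String) := diciplinas.map (fun _ => (PySem.Set.empty : List String))
  let conflito := (PySem.Dict.mk matriculas).values.foldl (fun conf turmas =>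
    turmas.foldl (fun conf c =>
      (index.getD c []).foldl (fun conf i =>
        PySem.List.pySetD conf i
          (PySem.Set.update (PySem.List.pyGetD conf i []) turmas)) conf) conf) conflito
  (conflito, PySem.Set.empty)

-- ===== PRECONDITION & SPEC =====
-- Pre_ excludes association lists with DUPLICATE keys: a Python dict cannot contain a duplicate key,
-- so such lists encode no input A ever receives (A iterates keys and looks each up, B iterates the pairs).
def Pre_lista_de_conflito (diciplinas : List String) (matriculas : List (String × List String)) : Prop :=
  (matriculas.map Prod.fst).Nodup
instance (diciplinas : List String) (matriculas : List (String × List String)) : Decidable (Pre_lista_de_conflito diciplinas matriculas) := by unfold Pre_lista_de_conflito; infer_instance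

def pvWitness_lista_de_conflito : List String × (List (String × List String)) :=
  (["mat", "fis"], [("ana", ["mat", "fis"]), ("bob", ["mat"])])

def Spec_lista_de_conflito (diciplinas : List String) (matriculas : List (String × List String)) (out : List (List String) × List String) : Prop := out = lista_de_conflito_alt diciplinas matriculas
instance (diciplinas : List String) (matriculas : List (String × List String)) (out : List (List String) × List String) : Decidable (Spec_lista_de_conflito diciplinas matriculas out) := by unfold Spec_lista_de_conflito; infer_instance

-- ===== CLAIM (what is proved, stated in full; the proofs are below) =====
def Claim_equal_lista_de_conflito : Prop := ∀ (diciplinas : List String) (matriculas : List (String × List String)), Dom_lista_de_conflito diciplinas matriculas → Pre_lista_de_conflito diciplinas matriculas → Spec_lista_de_conflito diciplinas matriculas (lista_de_conflito diciplinas matriculas)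

-- ===== LEMMAS AND PROOFS =====

-- updating a set with elements it already has changes nothing
lemma update_of_subset (s : PySem.Set String) (m : List String) (h : ∀ y ∈ m, y ∈ s) :
    PySem.Set.update s m = s := by
  induction m generalizing s with
  | nil => simp [PySem.Set.update]
  | cons x m ih =>
    rw [PySem.Set.update_cons, PySem.Set.add_of_mem (h x (by simp))]
    exact ih s (fun z hz => h z (by simp [hz]))

lemma update_update (s : PySem.Set String) (m : List String) :
    PySem.Set.update (PySem.Set.update s m) m = PySem.Set.update s m :=
  update_of_subset _ m (fun _ hx => (PySem.Set.mem_update _ _ _).2 (Or.inr hx))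

-- A's inner loop over range(len(diciplinas)): per-index characterisation
lemma innerA_spec (xs m : List String) (n : Nat) (conf : List (List String))
    (hle : n ≤ conf.length) :
    ((PySem.List.pyRange 0 (n : Int) 1).foldl (fun conf d =>
      if PySem.List.pyGetD xs d "" ∈ m then
        PySem.List.pySetD conf d
          (PySem.Set.union (PySem.List.pyGetD conf d []) m)
      else conf) conf).length = conf.length ∧
    ∀ k : Nat,
      ((PySem.List.pyRange 0 (n : Int) 1).foldl (fun conf d =>
        if PySem.List.pyGetD xs d "" ∈ m then
          PySem.List.pySetD conf d
            (PySem.Set.union (PySem.List.pyGetD conf d []) m)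
        else conf) conf).getD k [] =
        if k < n ∧ xs.getD k "" ∈ m then PySem.Set.update (conf.getD k []) m
        else conf.getD k [] := by
  induction n with
  | zero =>
    rw [PySem.List.pyRange_one_eq_nil (by norm_num)]
    simp
  | succ n ih =>
    obtain ⟨ihl, ihg⟩ := ih (by omega)
    have hsplit : PySem.List.pyRange 0 ((n + 1 : Nat) : Int) 1
        = PySem.List.pyRange 0 (n : Int) 1 ++ [(n : Int)] := by
      push_cast
      exact PySem.List.pyRange_one_succ_right (by positivity)
    rw [hsplit, List.foldl_append]
    set r := (PySem.List.pyRange 0 (n : Int) 1).foldl (fun conf d =>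
        if PySem.List.pyGetD xs d "" ∈ m then
          PySem.List.pySetD conf d
            (PySem.Set.union (PySem.List.pyGetD conf d []) m)
        else conf) conf with hr
    simp only [List.foldl_cons, List.foldl_nil, PySem.List.pyGetD_natCast,
      PySem.List.pySetD_natCast]
    by_cases hc : xs.getD n "" ∈ m
    · simp only [hc, if_pos]
      constructor
      · simp [ihl]
      · intro k
        have hrn : r.getD n [] = conf.getD n [] := by
          rw [ihg n]; simp
        by_cases hk : k = n
        · subst hk
          rw [List.getD_eq_getElem _ _ (by simp only [List.length_set, ihl]; omega),
            List.getElem_set_self (by simp only [List.length_set, ihl]; omega), hrn]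
          simp only [List.getD] at hc ⊢
          rw [if_pos ⟨by omega, hc⟩]
          rfl
        · rw [List.getD, List.getElem?_set_ne (by omega : n ≠ k), ← List.getD, ihg k]
          have hiff : (k < n ∧ xs.getD k "" ∈ m) ↔ (k < n + 1 ∧ xs.getD k "" ∈ m) := by
            constructor <;> (rintro ⟨h1, h2⟩; exact ⟨by omega, h2⟩)
          simp only [hiff]
    · simp only [hc, if_neg, not_false_iff]
      refine ⟨ihl, fun k => ?_⟩
      rw [ihg k]
      by_cases hk : k = n
      · subst hk
        rw [if_neg (fun h => hc h.2), if_neg (fun h => hc h.2)]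
      · have hiff : (k < n ∧ xs.getD k "" ∈ m) ↔ (k < n + 1 ∧ xs.getD k "" ∈ m) := by
          constructor <;> (rintro ⟨h1, h2⟩; exact ⟨by omega, h2⟩)
        simp only [hiff]

-- B's positions loop: per-index characterisation
lemma posFold_spec (m : List String) (L : List Int) (conf : List (List String))
    (hb : ∀ i ∈ L, 0 ≤ i ∧ i < (conf.length : Int)) :
    ((L.foldl (fun conf i =>
        PySem.List.pySetD conf i
          (PySem.Set.update (PySem.List.pyGetD conf i []) m)) conf).length = conf.length) ∧
    ∀ k : Nat,
      (L.foldl (fun conf i =>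
        PySem.List.pySetD conf i
          (PySem.Set.update (PySem.List.pyGetD conf i []) m)) conf).getD k [] =
        if (k : Int) ∈ L then PySem.Set.update (conf.getD k []) m else conf.getD k [] := by
  induction L generalizing conf with
  | nil => simp
  | cons i L ih =>
    obtain ⟨h0, hlt⟩ := hb i (by simp)
    simp only [List.foldl_cons]
    rw [PySem.List.pySetD_of_nonneg _ _ h0,
      PySem.List.pyGetD_eq_getElem _ _ h0 hlt]
    set conf' := conf.set i.toNat (PySem.Set.update (conf[i.toNat]'(by omega)) m) with hconf'
    have hlen' : conf'.length = conf.length := by simp [hconf']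
    obtain ⟨ihl, ihg⟩ := ih conf' (by
      intro j hj
      rw [hlen']
      exact hb j (by simp [hj]))
    refine ⟨by rw [ihl, hlen'], fun k => ?_⟩
    rw [ihg k]
    by_cases hk : (k : Int) = i
    · have hki : k = i.toNat := by omega
      have hkl : k < conf.length := by omega
      have hck : conf'.getD k [] = PySem.Set.update (conf.getD k []) m := by
        rw [hki, hconf',
          List.getD_eq_getElem _ _ (by simp only [List.length_set]; omega),
          List.getElem_set_self (by simp only [List.length_set]; omega)]
        congr 1
        rw [List.getD_eq_getElem _ _ (by omega)]
      rw [hck]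
      by_cases hmem : (k : Int) ∈ L
      · rw [if_pos hmem, if_pos (show (k : Int) ∈ i :: L by simp [hk]), update_update]
      · rw [if_neg hmem, if_pos (show (k : Int) ∈ i :: L by simp [hk])]
    · have hck : conf'.getD k [] = conf.getD k [] := by
        rw [hconf', List.getD, List.getElem?_set_ne (by omega : i.toNat ≠ k), ← List.getD]
      rw [hck]
      have hiff : ((k : Int) ∈ L) ↔ ((k : Int) ∈ i :: L) := by
        simp only [List.mem_cons]
        exact ⟨fun h => Or.inr h, fun h => h.resolve_left hk⟩
      simp only [hiff]

-- proof-only helpers naming the two loop bodies (defeq to the ports' inline folds)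
def pvStepA (xs m : List String) (conf : List (List String)) : List (List String) :=
  (PySem.List.pyRange 0 (xs.length : Int) 1).foldl (fun conf d =>
    if PySem.List.pyGetD xs d "" ∈ m then
      PySem.List.pySetD conf d
        (PySem.Set.union (PySem.List.pyGetD conf d []) m)
    else conf) conf

def pvIndex (xs : List String) : PySem.Dict String (List Int) :=
  (PySem.List.enumerate xs 0).foldl (fun d p => d.modify p.2 [] (· ++ [p.1])) PySem.Dict.empty

def pvStepB (xs m : List String) (conf : List (List String)) : List (List String) :=
  m.foldl (fun conf c =>
    ((pvIndex xs).getD c []).foldl (fun conf i =>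
      PySem.List.pySetD conf i
        (PySem.Set.update (PySem.List.pyGetD conf i []) m)) conf) conf

lemma pvIndex_getD (xs : List String) (c : String) :
    (pvIndex xs).getD c [] =
      (((PySem.List.enumerate xs 0).map Prod.swap).filter (fun q => q.1 == c)).map (·.2) := by
  have h := PySem.Dict.getD_foldl_modify_append
    ((PySem.List.enumerate xs 0).map Prod.swap) PySem.Dict.empty c
  rw [List.foldl_map] at h
  simpa [pvIndex, Prod.swap] using h

lemma mem_pvIndex (xs : List String) (c : String) (i : Int) :
    i ∈ (pvIndex xs).getD c [] ↔
      ∃ k : Nat, k < xs.length ∧ i = (k : Int) ∧ xs.getD k "" = c := by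
  rw [pvIndex_getD]
  simp only [List.mem_map, List.mem_filter, List.mem_map, PySem.List.mem_enumerate_iff]
  constructor
  · rintro ⟨q, ⟨⟨p, ⟨k, hk, rfl⟩, rfl⟩, hc⟩, rfl⟩
    refine ⟨k, hk, by simp, ?_⟩
    rw [List.getD_eq_getElem _ _ hk]
    simpa [Prod.swap] using hc
  · rintro ⟨k, hk, rfl, hc⟩
    refine ⟨((xs[k]'hk : String), (k : Int)), ⟨⟨((k : Int), (xs[k]'hk : String)), ⟨k, hk, by simp⟩, rfl⟩, ?_⟩, rfl⟩
    rw [List.getD_eq_getElem _ _ hk] at hc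
    simpa using hc

lemma stepA_spec (xs m : List String) (conf : List (List String))
    (hlen : conf.length = xs.length) :
    (pvStepA xs m conf).length = conf.length ∧
    ∀ k : Nat, (pvStepA xs m conf).getD k [] =
      if k < xs.length ∧ xs.getD k "" ∈ m then PySem.Set.update (conf.getD k []) m
      else conf.getD k [] :=
  innerA_spec xs m xs.length conf (by omega)

lemma stepB_spec (xs m : List String) (conf : List (List String))
    (hlen : conf.length = xs.length) :
    (pvStepB xs m conf).length = conf.length ∧
    ∀ k : Nat, (pvStepB xs m conf).getD k [] =
      if k < xs.length ∧ xs.getD k "" ∈ m then PySem.Set.update (conf.getD k []) m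
      else conf.getD k [] := by
  unfold pvStepB
  rw [← List.foldl_flatMap]
  have hbound : ∀ i ∈ m.flatMap (fun c => (pvIndex xs).getD c []),
      0 ≤ i ∧ i < (conf.length : Int) := by
    intro i hi
    obtain ⟨c, _, hic⟩ := List.mem_flatMap.1 hi
    obtain ⟨k, hk, rfl, _⟩ := (mem_pvIndex xs c i).1 hic
    constructor
    · positivity
    · omega
  obtain ⟨hl, hg⟩ := posFold_spec m (m.flatMap (fun c => (pvIndex xs).getD c [])) conf hbound
  refine ⟨hl, fun k => ?_⟩
  rw [hg k]
  have hiff : ((k : Int) ∈ m.flatMap (fun c => (pvIndex xs).getD c [])) ↔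
      (k < xs.length ∧ xs.getD k "" ∈ m) := by
    rw [List.mem_flatMap]
    constructor
    · rintro ⟨c, hc, hkc⟩
      obtain ⟨k', hk', hkk, hx⟩ := (mem_pvIndex xs c _).1 hkc
      have : k = k' := by omega
      subst this
      exact ⟨hk', hx ▸ hc⟩
    · rintro ⟨hk, hx⟩
      exact ⟨xs.getD k "", hx, (mem_pvIndex xs _ _).2 ⟨k, hk, rfl, rfl⟩⟩
  simp only [hiff]

lemma eq_of_length_getD (l l' : List (List String)) (hl : l.length = l'.length)
    (h : ∀ k : Nat, l.getD k [] = l'.getD k []) : l = l' := by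
  apply List.ext_getElem hl
  intro k h1 h2
  rw [← List.getD_eq_getElem l [] h1, ← List.getD_eq_getElem l' [] h2, h k]

lemma step_eq (xs m : List String) (conf : List (List String))
    (hlen : conf.length = xs.length) : pvStepA xs m conf = pvStepB xs m conf := by
  obtain ⟨hal, hag⟩ := stepA_spec xs m conf hlen
  obtain ⟨hbl, hbg⟩ := stepB_spec xs m conf hlen
  exact eq_of_length_getD _ _ (by rw [hal, hbl]) (fun k => by rw [hag k, hbg k])

lemma outer_eq (xs : List String) (mat : List (String × List String)) :
    ∀ conf : List (List String), conf.length = xs.length →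
      mat.foldl (fun conf p => pvStepA xs p.2 conf) conf
        = mat.foldl (fun conf p => pvStepB xs p.2 conf) conf := by
  induction mat with
  | nil => intro conf _; rfl
  | cons p mat ih =>
    intro conf hlen
    simp only [List.foldl_cons]
    rw [step_eq xs p.2 conf hlen]
    exact ih _ (by rw [(stepB_spec xs p.2 conf hlen).1, hlen])

lemma foldA_eq (xs : List String) (mat : List (String × List String))
    (hnd : (mat.map Prod.fst).Nodup) (conf : List (List String)) :
    (PySem.Dict.mk mat).keys.foldl
        (fun conf a => pvStepA xs (PySem.Dict.getD (PySem.Dict.mk mat) a []) conf) conf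
      = mat.foldl (fun conf p => pvStepA xs p.2 conf) conf := by
  rw [show (PySem.Dict.mk mat).keys = mat.map Prod.fst from rfl, List.foldl_map]
  exact PySem.List.foldl_congr_mem _ _ _ _ (fun acc p hp => by
    rw [PySem.Dict.getD_of_mem_items (PySem.Dict.mk mat) (k := p.1) (v := p.2)
      (by exact hp) (by exact hnd)])

lemma foldB_eq (xs : List String) (mat : List (String × List String))
    (conf : List (List String)) :
    (PySem.Dict.mk mat).values.foldl (fun conf m => pvStepB xs m conf) conf
      = mat.foldl (fun conf p => pvStepB xs p.2 conf) conf := by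
  rw [show (PySem.Dict.mk mat).values = mat.map Prod.snd from rfl, List.foldl_map]

-- ===== VERDICT (by name: the statement is the Claim_ definition above) =====
theorem lista_de_conflito_spec : Claim_equal_lista_de_conflito := by
  intro xs mat _hdom hpre
  show lista_de_conflito xs mat = lista_de_conflito_alt xs mat
  show ((PySem.Dict.mk mat).keys.foldl
          (fun conf a => pvStepA xs (PySem.Dict.getD (PySem.Dict.mk mat) a []) conf)
          (xs.map fun _ => []), ([] : List String))
      = ((PySem.Dict.mk mat).values.foldl (fun conf m => pvStepB xs m conf)
          (xs.map fun _ => []), ([] : List String))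
  rw [foldA_eq xs mat hpre, foldB_eq xs mat,
    outer_eq xs mat (xs.map fun _ => []) (by simp)]
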